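-- pv_equiv track=rewrite | github.com/JungWooChul/Python-Algorithm | 백준/Silver/1244. 스위치 켜고 끄기/스위치 켜고 끄기.py | female
-- ===== SOURCE A (Python) =====
-- def female(arr, num):
--     num -= 1
--     left, right = num - 1, num + 1
--     arr[num] = (arr[num]+1)%2
--     while left >= 0 and right < len(arr):
--         if arr[left] == arr[right]:
--             arr[left], arr[right] = (arr[left]+1)%2, (arr[right]+1)%2
--             left -= 1
--             right += 1
--         else:
--             break
--     return arr
-- ===== SOURCE B (Python) =====
-- def female(arr, num):
--     # Two-phase: first measure the mirror radius around the center, then apply all flips.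
--     # Mutates arr in place exactly like the original; return value is the same list.
--     i = num - 1
--     r = 0
--     while i - (r + 1) >= 0 and i + (r + 1) < len(arr) and arr[i - (r + 1)] == arr[i + (r + 1)]:
--         r += 1
--     arr[i] = (arr[i] + 1) % 2
--     for d in range(1, r + 1):
--         arr[i - d] = (arr[i - d] + 1) % 2
--         arr[i + d] = (arr[i + d] + 1) % 2
--     return arr
-- ===== Notes on version B (the rewrite author's own statement) =====
-- stated objective: alternative
-- what changed: A interleaves comparing and flipping each mirrored pair in one widening while-loop; B first measures the mirror radius r in a pure scan and then applies all flips (center plus pairs 1..r) in a separate pass.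
import Mathlib
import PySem

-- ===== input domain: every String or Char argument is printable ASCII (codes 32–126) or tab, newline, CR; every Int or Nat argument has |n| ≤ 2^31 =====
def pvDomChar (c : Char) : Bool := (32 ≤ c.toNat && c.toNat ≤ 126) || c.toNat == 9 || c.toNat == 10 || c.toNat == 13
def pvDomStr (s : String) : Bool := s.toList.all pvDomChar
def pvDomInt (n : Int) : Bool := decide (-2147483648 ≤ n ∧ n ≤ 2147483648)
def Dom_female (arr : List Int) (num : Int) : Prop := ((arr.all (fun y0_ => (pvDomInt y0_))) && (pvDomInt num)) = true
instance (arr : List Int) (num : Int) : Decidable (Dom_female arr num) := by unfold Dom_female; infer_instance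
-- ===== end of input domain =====

-- B re-decomposes A's interleaved compare-and-flip walk into measure-radius-then-apply-flips (objective: alternative; both mutate arr in place in Python, equivalence proved about the returned list).

-- ===== PORT A =====
-- A's while loop: compare the mirrored pair, flip it (tuple assignment: both new values read the old list), widen.
def femaleLoop (arr : List Int) (left right : Int) : List Int :=
  if h : 0 ≤ left ∧ right < (arr.length : Int) then
    if PySem.List.pyGetD arr left 0 = PySem.List.pyGetD arr right 0 then
      femaleLoop
        (PySem.List.pySetD
          (PySem.List.pySetD arr left (PySem.Int.mod (PySem.List.pyGetD arr left 0 + 1) 2))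
          right (PySem.Int.mod (PySem.List.pyGetD arr right 0 + 1) 2))
        (left - 1) (right + 1)
    else arr
  else arr
termination_by (left + 1).toNat
decreasing_by omega

def female (arr : List Int) (num : Int) : List Int :=
  let num := num - 1
  let left := num - 1
  let right := num + 1
  let arr := PySem.List.pySetD arr num (PySem.Int.mod (PySem.List.pyGetD arr num 0 + 1) 2)
  femaleLoop arr left right

-- ===== PORT B =====
-- Source B's while loop: count consecutive equal mirrored pairs outward from the center.
def radLoop (arr : List Int) (i : Int) (r : Nat) : Nat :=
  if h : 0 ≤ i - ((r : Int) + 1) ∧ i + ((r : Int) + 1) < (arr.length : Int) ∧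
      PySem.List.pyGetD arr (i - ((r : Int) + 1)) 0 = PySem.List.pyGetD arr (i + ((r : Int) + 1)) 0 then
    radLoop arr i (r + 1)
  else r
termination_by ((arr.length : Int) - (i + (r : Int))).toNat
decreasing_by simp only [Nat.cast_add, Nat.cast_one]; omega

-- Source B's for-loop body: flip arr[i-d], then flip arr[i+d] on the updated list.
def flipStep (i : Int) (a : List Int) (d : Int) : List Int :=
  let a1 := PySem.List.pySetD a (i - d) (PySem.Int.mod (PySem.List.pyGetD a (i - d) 0 + 1) 2)
  PySem.List.pySetD a1 (i + d) (PySem.Int.mod (PySem.List.pyGetD a1 (i + d) 0 + 1) 2)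

def female_alt (arr : List Int) (num : Int) : List Int :=
  let i := num - 1
  let r := radLoop arr i 0
  let arr1 := PySem.List.pySetD arr i (PySem.Int.mod (PySem.List.pyGetD arr i 0 + 1) 2)
  (PySem.List.pyRange 1 ((r : Int) + 1) 1).foldl (flipStep i) arr1

-- ===== PRECONDITION & SPEC =====
-- Pre_ excludes exactly the inputs where Python A raises IndexError on arr[num-1].
def Pre_female (arr : List Int) (num : Int) : Prop := PySem.Raise.InRange arr.length (num - 1)
instance (arr : List Int) (num : Int) : Decidable (Pre_female arr num) := by unfold Pre_female; infer_instance
def pvWitness_female : List Int × Int := ([1, 0, 1, 0, 1], 3)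

def Spec_female (arr : List Int) (num : Int) (out : List Int) : Prop := out = female_alt arr num
instance (arr : List Int) (num : Int) (out : List Int) : Decidable (Spec_female arr num out) := by unfold Spec_female; infer_instance

-- ===== CLAIM (what is proved, stated in full; the proofs are below) =====
def Claim_equal_female : Prop := ∀ (arr : List Int) (num : Int), Dom_female arr num → Pre_female arr num → Spec_female arr num (female arr num)

-- ===== LEMMAS AND PROOFS =====

-- Reading an index other than the one just written (both indices nonnegative).
lemma pyGetD_pySetD_ne (a : List Int) (j k v : Int) (hj : 0 ≤ j) (hk : 0 ≤ k) (hne : j ≠ k) :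
    PySem.List.pyGetD (PySem.List.pySetD a j v) k 0 = PySem.List.pyGetD a k 0 := by
  rw [PySem.List.pySetD_of_nonneg a v hj]
  rw [show k = ((k.toNat : Nat) : Int) by omega]
  rw [PySem.List.pyGetD_natCast, PySem.List.pyGetD_natCast]
  simp only [List.getD_eq_getElem?_getD, List.getElem?_set]
  rw [if_neg (by omega)]

lemma radLoop_ge (arr : List Int) (i : Int) (r : Nat) : r ≤ radLoop arr i r := by
  induction r using radLoop.induct (arr := arr) (i := i) with
  | case1 r h ih => rw [radLoop, dif_pos h]; omega
  | case2 r h => rw [radLoop, dif_neg h]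

-- radLoop only inspects mirrored pairs strictly beyond radius r.
lemma radLoop_congr (arr : List Int) (i : Int) (r : Nat) :
    ∀ (arr' : List Int), arr.length = arr'.length →
    (∀ k : Int, 0 ≤ k → (k ≤ i - ((r : Int) + 1) ∨ i + ((r : Int) + 1) ≤ k) →
      PySem.List.pyGetD arr k 0 = PySem.List.pyGetD arr' k 0) →
    radLoop arr i r = radLoop arr' i r := by
  induction r using radLoop.induct (arr := arr) (i := i) with
  | case1 r h ih =>
    intro arr' hlen hagree
    have hL : PySem.List.pyGetD arr (i - ((r : Int) + 1)) 0 = PySem.List.pyGetD arr' (i - ((r : Int) + 1)) 0 :=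
      hagree _ h.1 (Or.inl le_rfl)
    have hR : PySem.List.pyGetD arr (i + ((r : Int) + 1)) 0 = PySem.List.pyGetD arr' (i + ((r : Int) + 1)) 0 :=
      hagree _ (by omega) (Or.inr le_rfl)
    have hg' : 0 ≤ i - ((r : Int) + 1) ∧ i + ((r : Int) + 1) < (arr'.length : Int) ∧
        PySem.List.pyGetD arr' (i - ((r : Int) + 1)) 0 = PySem.List.pyGetD arr' (i + ((r : Int) + 1)) 0 :=
      ⟨h.1, by rw [← hlen]; exact h.2.1, by rw [← hL, ← hR]; exact h.2.2⟩
    rw [radLoop, dif_pos h]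
    conv_rhs => rw [radLoop, dif_pos hg']
    exact ih arr' hlen (fun k hk hreg => hagree k hk (by push_cast at hreg ⊢; omega))
  | case2 r h =>
    intro arr' hlen hagree
    have hg' : ¬ (0 ≤ i - ((r : Int) + 1) ∧ i + ((r : Int) + 1) < (arr'.length : Int) ∧
        PySem.List.pyGetD arr' (i - ((r : Int) + 1)) 0 = PySem.List.pyGetD arr' (i + ((r : Int) + 1)) 0) := by
      intro h'
      exact h ⟨h'.1, by rw [hlen]; exact h'.2.1, by
        have hL := hagree _ h'.1 (Or.inl le_rfl)
        have hR := hagree _ (by omega) (Or.inr le_rfl)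
        rw [hL, hR]; exact h'.2.2⟩
    rw [radLoop, dif_neg h]
    conv_rhs => rw [radLoop, dif_neg hg']

-- A's interleaved walk from radius r+1 equals applying flipStep for each matched radius.
lemma loop_eq (n : Nat) : ∀ (arr : List Int) (i : Int) (r : Nat),
    (((arr.length : Int)) - (i + (r : Int))).toNat ≤ n →
    femaleLoop arr (i - ((r : Int) + 1)) (i + ((r : Int) + 1)) =
      (PySem.List.pyRange ((r : Int) + 1) (((radLoop arr i r : Nat) : Int) + 1) 1).foldl (flipStep i) arr := by
  induction n with
  | zero =>
    intro arr i r hm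
    have hb : ¬ (0 ≤ i - ((r : Int) + 1) ∧ i + ((r : Int) + 1) < (arr.length : Int)) := by omega
    rw [femaleLoop, dif_neg hb, radLoop, dif_neg (fun h => hb ⟨h.1, h.2.1⟩),
      PySem.List.pyRange_one_eq_nil le_rfl, List.foldl_nil]
  | succ n ih =>
    intro arr i r hm
    by_cases hb : 0 ≤ i - ((r : Int) + 1) ∧ i + ((r : Int) + 1) < (arr.length : Int)
    · by_cases he : PySem.List.pyGetD arr (i - ((r : Int) + 1)) 0 = PySem.List.pyGetD arr (i + ((r : Int) + 1)) 0
      · -- pair matches: A flips it and widens; B counts it.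
        set L : Int := i - ((r : Int) + 1) with hLdef
        set Rr : Int := i + ((r : Int) + 1) with hRdef
        set vL : Int := PySem.Int.mod (PySem.List.pyGetD arr L 0 + 1) 2 with hvL
        set vR : Int := PySem.Int.mod (PySem.List.pyGetD arr Rr 0 + 1) 2 with hvR
        set arr2 : List Int := PySem.List.pySetD (PySem.List.pySetD arr L vL) Rr vR with harr2
        have hlen2 : arr2.length = arr.length := by
          rw [harr2, PySem.List.length_pySetD, PySem.List.length_pySetD]
        have hLR : L ≠ Rr := by omega
        have hL0 : 0 ≤ L := hb.1
        have hR0 : 0 ≤ Rr := by omega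
        have hflip : flipStep i arr ((r : Int) + 1) = arr2 := by
          rw [flipStep]
          show PySem.List.pySetD (PySem.List.pySetD arr L _) Rr _ = arr2
          rw [pyGetD_pySetD_ne arr L Rr vL hL0 hR0 hLR, harr2]
        have hrad : radLoop arr i r = radLoop arr i (r + 1) := by
          rw [radLoop, dif_pos ⟨hb.1, hb.2, he⟩]
        have hrad2 : radLoop arr2 i (r + 1) = radLoop arr i (r + 1) := by
          refine radLoop_congr arr2 i (r + 1) arr hlen2 ?_
          intro k hk hreg
          have hkL : L ≠ k := by push_cast at hreg; omega
          have hkR : Rr ≠ k := by push_cast at hreg; omega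
          rw [harr2, pyGetD_pySetD_ne _ Rr k vR hR0 hk hkR,
            pyGetD_pySetD_ne arr L k vL hL0 hk hkL]
        have hge : r + 1 ≤ radLoop arr i (r + 1) := radLoop_ge arr i (r + 1)
        rw [femaleLoop, dif_pos hb, if_pos he]
        rw [hrad]
        rw [PySem.List.pyRange_one_cons (by omega), List.foldl_cons, hflip]
        have := ih arr2 i (r + 1) (by rw [hlen2]; push_cast at hm ⊢; omega)
        rw [hrad2] at this
        push_cast at this
        rw [show i - ((r : Int) + 1) - 1 = i - ((r : Int) + 1 + 1) by ring,
          show i + ((r : Int) + 1) + 1 = i + ((r : Int) + 1 + 1) by ring]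
        exact this
      · rw [femaleLoop, dif_pos hb, if_neg he, radLoop,
          dif_neg (fun h => he h.2.2), PySem.List.pyRange_one_eq_nil le_rfl, List.foldl_nil]
    · rw [femaleLoop, dif_neg hb, radLoop, dif_neg (fun h => hb ⟨h.1, h.2.1⟩),
        PySem.List.pyRange_one_eq_nil le_rfl, List.foldl_nil]

-- ===== VERDICT =====
theorem female_spec : Claim_equal_female := by
  intro arr num _ _
  show femaleLoop
      (PySem.List.pySetD arr (num - 1) (PySem.Int.mod (PySem.List.pyGetD arr (num - 1) 0 + 1) 2))
      (num - 1 - 1) (num - 1 + 1) =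
    List.foldl (flipStep (num - 1))
      (PySem.List.pySetD arr (num - 1) (PySem.Int.mod (PySem.List.pyGetD arr (num - 1) 0 + 1) 2))
      (PySem.List.pyRange 1 ((radLoop arr (num - 1) 0 : Int) + 1) 1)
  set i : Int := num - 1 with hi
  set arr1 : List Int := PySem.List.pySetD arr i (PySem.Int.mod (PySem.List.pyGetD arr i 0 + 1) 2) with harr1
  have hlen1 : arr1.length = arr.length := PySem.List.length_pySetD arr _ _
  by_cases h0 : 0 ≤ i
  · have := loop_eq ((((arr1.length : Int)) - i).toNat) arr1 i 0 (by push_cast; omega)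
    simp only [Nat.cast_zero, zero_add] at this
    rw [this, show radLoop arr1 i 0 = radLoop arr i 0 by
      refine radLoop_congr arr1 i 0 arr hlen1 ?_
      intro k hk hreg
      rw [harr1, pyGetD_pySetD_ne arr i k _ h0 hk (by push_cast at hreg; omega)]]
  · have hr0 : radLoop arr i 0 = 0 := by
      rw [radLoop, dif_neg (by push_cast; omega)]
    rw [femaleLoop, dif_neg (by omega), hr0]
    simp [PySem.List.pyRange_one_eq_nil]
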